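-- pv_equiv track=rewrite | github.com/WhoopInc/snowflake-semantic-tools | snowflake_semantic_tools/core/metadata/in_memory_store.py | _index_by_table
-- ===== SOURCE A (Python) =====
-- from typing import Any, Dict, List, Optional
--
-- def _upper_keys(record: Dict[str, Any]) -> Dict[str, Any]:
--     return {k.upper(): v for k, v in record.items()}
--
-- def _index_by_table(records: List[Dict]) -> Dict[str, List[Dict]]:
--     index: Dict[str, List[Dict]] = {}
--     for r in records:
--         rec = _upper_keys(r)
--         table = (rec.get("TABLE_NAME") or "").lower()
--         if table not in index:
--             index[table] = []
--         without_table = {k: v for k, v in rec.items() if k != "TABLE_NAME"}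
--         index[table].append(without_table)
--     return index
-- ===== SOURCE B (Python) =====
-- def _index_by_table(records):
--     def prep(r):
--         rec = {k.upper(): v for k, v in r.items()}
--         table = (rec.get("TABLE_NAME") or "").lower()
--         return table, {k: v for k, v in rec.items() if k != "TABLE_NAME"}
--
--     pairs = [prep(r) for r in records]
--     tables = list(dict.fromkeys(t for t, _ in pairs))
--     return {t: [body for tt, body in pairs if tt == t] for t in tables}
-- ===== Notes on version B (the rewrite author's own statement) =====
-- stated objective: alternative
-- what changed: Replaced the one-pass dict-of-lists accumulation with a two-phase pass: precompute all (table, stripped-record) pairs, take the table names deduped in first-occurrence order, and build each bucket by filtering the pair list.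
import Mathlib
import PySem

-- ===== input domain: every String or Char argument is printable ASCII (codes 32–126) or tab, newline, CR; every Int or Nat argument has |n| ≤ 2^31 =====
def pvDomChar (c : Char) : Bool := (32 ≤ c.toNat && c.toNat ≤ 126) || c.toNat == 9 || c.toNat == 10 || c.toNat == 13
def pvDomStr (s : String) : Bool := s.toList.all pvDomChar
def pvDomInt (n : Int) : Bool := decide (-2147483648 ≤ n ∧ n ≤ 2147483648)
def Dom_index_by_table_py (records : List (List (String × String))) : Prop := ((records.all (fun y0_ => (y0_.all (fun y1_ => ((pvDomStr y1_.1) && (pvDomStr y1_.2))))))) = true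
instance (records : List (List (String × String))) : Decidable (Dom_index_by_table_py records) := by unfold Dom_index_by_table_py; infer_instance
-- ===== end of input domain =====

-- B replaces A's incremental dict-of-lists accumulation by a two-phase pass (precompute pairs,
-- dedup table names, build each bucket by filtering); alternative decomposition, no speed claim.

-- {k.upper(): v for k, v in record.items()}  (A's helper _upper_keys; B writes the same comprehension inline)
def pvUpperKeys (r : List (String × String)) : PySem.Dict String String :=
  r.foldl (fun d p => d.insert (PySem.Str.upper p.1) p.2) PySem.Dict.empty

-- ===== PORT A =====
def index_by_table_py (records : List (List (String × String))) : List (String × List (List (String × String))) :=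
  (records.foldl (fun ix r =>
      let rec0 := pvUpperKeys r
      -- (rec.get("TABLE_NAME") or ""): a string is falsy iff empty, so 'x or ""' = getD ""
      let table := PySem.Str.lower ((rec0.get? "TABLE_NAME").getD "")
      let ix1 := if ix.contains table then ix else ix.insert table []
      let wt := rec0.items.filter (fun p => p.1 != "TABLE_NAME")
      ix1.modify table [] (fun xs => xs ++ [wt]))
    PySem.Dict.empty).items

-- ===== PORT B =====
def pvPrep (r : List (String × String)) : String × List (String × String) :=
  let rec0 := pvUpperKeys r
  let table := PySem.Str.lower ((rec0.get? "TABLE_NAME").getD "")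
  (table, rec0.items.filter (fun p => p.1 != "TABLE_NAME"))

def index_by_table_py_alt (records : List (List (String × String))) : List (String × List (List (String × String))) :=
  let pairs := records.map pvPrep
  let tables := PySem.List.dedup (pairs.map (fun p => p.1))
  -- {t: [body for tt, body in pairs if tt == t] for t in tables}: dict comprehension over deduped keys
  (tables.foldl (fun d t => d.insert t ((pairs.filter (fun p => p.1 == t)).map (fun p => p.2)))
    PySem.Dict.empty).items

-- ===== PRECONDITION & SPEC =====
def Spec_index_by_table_py (records : List (List (String × String))) (out : List (String × List (List (String × String)))) : Prop := out = index_by_table_py_alt records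
instance (records : List (List (String × String))) (out : List (String × List (List (String × String)))) : Decidable (Spec_index_by_table_py records out) := by unfold Spec_index_by_table_py; infer_instance

-- ===== CLAIM (what is proved, stated in full; the proofs are below) =====
def Claim_equal_index_by_table_py : Prop := ∀ (records : List (List (String × String))), Dom_index_by_table_py records → Spec_index_by_table_py records (index_by_table_py records)

-- ===== LEMMAS AND PROOFS =====

-- a dict with Nodup keys is the map of getD over its keys
theorem pv_items_eq_map_keys {ν : Type} (d : PySem.Dict String ν) (d0 : ν) (h : d.keys.Nodup) :
    d.items = d.keys.map (fun k => (k, d.getD k d0)) := by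
  have h1 : d.keys.map (fun k => (k, d.getD k d0)) = d.items.map (fun p => (p.1, d.getD p.1 d0)) := by
    simp only [PySem.Dict.keys, List.map_map]; rfl
  have h2 : ∀ p ∈ d.items, (p.1, d.getD p.1 d0) = p := by
    intro p hp
    obtain ⟨a, b⟩ := p
    simp [PySem.Dict.getD_of_mem_items d hp h d0]
  rw [h1, List.map_congr_left h2]; simp

-- A's loop body (with its "if absent, seed []" step) is a plain modify-append
theorem pv_stepA_eq (d : PySem.Dict String (List (List (String × String)))) (t : String)
    (w : List (String × String)) :
    (if d.contains t then d else d.insert t []).modify t [] (fun xs => xs ++ [w]) =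
      d.modify t [] (fun xs => xs ++ [w]) := by
  by_cases h : d.contains t
  · simp [h]
  · have h' : d.contains t = false := by simpa using h
    simp only [h', Bool.false_eq_true, if_false, PySem.Dict.modify, PySem.Dict.getD_insert_self,
      PySem.Dict.insert_insert_self, PySem.Dict.getD_of_not_contains d ([] : List (List (String × String))) h']

theorem index_by_table_py_eq_alt (records : List (List (String × String))) :
    index_by_table_py records = index_by_table_py_alt records := by
  unfold index_by_table_py index_by_table_py_alt
  have hA : records.foldl (fun ix r =>
      let rec0 := pvUpperKeys r
      let table := PySem.Str.lower ((rec0.get? "TABLE_NAME").getD "")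
      let ix1 := if ix.contains table then ix else ix.insert table []
      let wt := rec0.items.filter (fun p => p.1 != "TABLE_NAME")
      ix1.modify table [] (fun xs => xs ++ [wt])) PySem.Dict.empty
      = (records.map pvPrep).foldl
          (fun d p => d.modify p.1 [] (fun xs => xs ++ [p.2])) PySem.Dict.empty := by
    rw [List.foldl_map]
    exact PySem.List.foldl_congr_mem records _ _ PySem.Dict.empty
      (fun d r _ => pv_stepA_eq d (pvPrep r).1 (pvPrep r).2)
  rw [hA]
  set pairs := records.map pvPrep with hpairs
  set D := pairs.foldl (fun d p => d.modify p.1 [] (fun xs => xs ++ [p.2])) PySem.Dict.empty with hD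
  have hnodup : D.keys.Nodup :=
    PySem.Dict.nodup_keys_foldl_modify_key pairs (fun p => p.1) []
      (fun _ p => fun xs => xs ++ [p.2]) PySem.Dict.empty (by simp)
  have hkeys : D.keys = PySem.List.dedup (pairs.map (fun p => p.1)) := by
    rw [hD, PySem.Dict.keys_foldl_modify_key pairs (fun p => p.1) []
      (fun _ p => fun xs => xs ++ [p.2]) PySem.Dict.empty, PySem.List.dedup_eq_ofList]
    rfl
  have hget : ∀ t, D.getD t [] = (pairs.filter (fun p => p.1 == t)).map (fun p => p.2) := by
    intro t
    rw [hD, PySem.Dict.getD_foldl_modify_append]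
    simp [PySem.Dict.getD_empty]
  have hB : ((PySem.List.dedup (pairs.map (fun p => p.1))).foldl
      (fun d t => d.insert t ((pairs.filter (fun p => p.1 == t)).map (fun p => p.2)))
      PySem.Dict.empty).items
      = (PySem.List.dedup (pairs.map (fun p => p.1))).map
          (fun t => (t, (pairs.filter (fun p => p.1 == t)).map (fun p => p.2))) := by
    rw [PySem.Dict.items_foldl_insert_fresh _ (fun t => t)
      (fun t => (pairs.filter (fun p => p.1 == t)).map (fun p => p.2)) PySem.Dict.empty
      (fun a _ => PySem.Dict.contains_empty a)
      (by simp)]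
    rfl
  rw [hB, pv_items_eq_map_keys D [] hnodup, hkeys]
  exact List.map_congr_left (fun t _ => by rw [hget t])

-- ===== VERDICT (by name: the statement is the Claim_ definition above) =====
theorem index_by_table_py_spec : Claim_equal_index_by_table_py := by
  intro records _
  exact index_by_table_py_eq_alt records
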